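-- pv_equiv track=rewrite | github.com/degD/Exercises | MicroMatrix.py | _check_pre_def
-- ===== SOURCE A (Python) =====
-- def _check_pre_def(test_input):
--     """Checks the test_input, to be sure that it's a 2-dimensional array,
--     that's suitable to form a matrix.
--
--     Returns True if it is, and False otherwise.
--     """
--
--     if isinstance(test_input, list) and len(test_input) > 0:
--
--         if isinstance(test_input[0], list):
--             elem_len = len(test_input[0])
--         else:
--             return False
--
--         for elem in test_input[1:]:
--             if not isinstance(elem, list) or elem_len != len(elem):
--                 return False
--
--         return True
--     return False
-- ===== SOURCE B (Python) =====
-- def _check_pre_def(test_input):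
--     if not isinstance(test_input, list) or not test_input:
--         return False
--
--     def chain(rows):
--         # rows is nonempty: head must be a list; a single row is rectangular;
--         # otherwise the first two rows must be lists of equal length, then recurse.
--         if not isinstance(rows[0], list):
--             return False
--         if len(rows) == 1:
--             return True
--         return (isinstance(rows[1], list)
--                 and len(rows[0]) == len(rows[1])
--                 and chain(rows[1:]))
--
--     return chain(test_input)
-- ===== Notes on version B (the rewrite author's own statement) =====
-- stated objective: alternative
-- what changed: B decides rectangularity recursively by comparing each row's length only to its immediate successor (an adjacent-pairs chain, correct by transitivity of equality), instead of A's iterative loop comparing every tail row against the stored first-row length.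
import Mathlib
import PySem

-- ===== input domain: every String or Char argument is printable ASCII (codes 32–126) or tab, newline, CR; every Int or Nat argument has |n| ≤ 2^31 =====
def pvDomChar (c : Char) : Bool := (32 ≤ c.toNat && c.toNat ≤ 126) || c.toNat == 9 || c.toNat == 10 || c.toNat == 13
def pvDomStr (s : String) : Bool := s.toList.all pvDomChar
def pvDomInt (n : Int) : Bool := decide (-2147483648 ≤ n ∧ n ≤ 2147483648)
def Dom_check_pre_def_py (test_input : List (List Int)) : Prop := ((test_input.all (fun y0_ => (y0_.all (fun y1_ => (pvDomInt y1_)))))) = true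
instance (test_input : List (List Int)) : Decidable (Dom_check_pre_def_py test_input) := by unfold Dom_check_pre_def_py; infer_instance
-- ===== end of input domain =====

-- B decides rectangularity by a recursive adjacent-pairs chain (each row's length compared to
-- its successor's, correct by transitivity) instead of A's loop against the first row's length.
-- Return value only; at type List (List Int) the isinstance checks are always true.

-- ===== PORT A =====
def check_pre_def_py (test_input : List (List Int)) : Bool :=
  if test_input.length > 0 then
    match test_input with
    | [] => false
    | first :: rest =>
      let elem_len : Int := first.length
      -- for elem in test_input[1:]: if elem_len != len(elem): return False; then return True
      rest.all (fun elem => elem_len == (elem.length : Int))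
  else false

-- ===== PORT B =====
-- chain(rows): rows nonempty; one row → True; else len(rows[0]) == len(rows[1]) and chain(rows[1:])
def pyChainRect : List (List Int) → Bool
  | [] => true          -- never reached from check_pre_def_py_alt (only called on nonempty lists)
  | [_] => true
  | a :: b :: rest => (a.length == b.length) && pyChainRect (b :: rest)

def check_pre_def_py_alt (test_input : List (List Int)) : Bool :=
  if test_input.isEmpty then false
  else pyChainRect test_input

-- ===== PRECONDITION & SPEC =====
def Spec_check_pre_def_py (test_input : List (List Int)) (out : Bool) : Prop := out = check_pre_def_py_alt test_input
instance (test_input : List (List Int)) (out : Bool) : Decidable (Spec_check_pre_def_py test_input out) := by unfold Spec_check_pre_def_py; infer_instance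

-- ===== CLAIM (what is proved, stated in full; the proofs are below) =====
def Claim_equal_check_pre_def_py : Prop := ∀ (test_input : List (List Int)), Dom_check_pre_def_py test_input → Spec_check_pre_def_py test_input (check_pre_def_py test_input)

-- ===== LEMMAS AND PROOFS =====

-- The adjacent-pairs chain starting at a holds iff every later row has a's length.
lemma chain_eq_all (a : List Int) (xs : List (List Int)) :
    pyChainRect (a :: xs) = xs.all (fun e => ((a.length : Int)) == (e.length : Int)) := by
  induction xs generalizing a with
  | nil => rfl
  | cons b ys ih =>
    by_cases h : a.length = b.length
    · simp [pyChainRect, ih, h]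
    · have h' : ((a.length : Int) == (b.length : Int)) = false := by
        simp; exact_mod_cast h
      have h'' : (a.length == b.length) = false := by simp [h]
      simp [pyChainRect, h', h'']

-- ===== VERDICT (by name: the statement is the Claim_ definition above) =====
theorem check_pre_def_py_spec : Claim_equal_check_pre_def_py := by
  intro t _
  unfold Spec_check_pre_def_py check_pre_def_py check_pre_def_py_alt
  match t with
  | [] => rfl
  | first :: rest =>
    simp only [List.isEmpty_cons, List.length_cons, if_neg, Bool.false_eq_true,
      not_false_eq_true, Nat.succ_pos, if_pos]
    rw [chain_eq_all]
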